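-- pv_equiv track=rewrite | github.com/opd/myshitplugin.vim | python/matcher.py | _find_occurences
-- ===== SOURCE A (Python) =====
-- def _find_occurences(line, pattern):
--     if not pattern:
--         return []
--     char = pattern[0]
--     result = []
--     for i, c in enumerate(line):
--         if c == char:
--             if len(pattern) == 1:
--                 result.append([0] * i + [1] + [0] * (len(line) - i - 1))
--                 continue
--             recur_results = _find_occurences(line[(i+1):], pattern[1:])
--             if recur_results:
--                 begin = [0] * i + [1]
--                 for res in recur_results:
--                     result.append(begin + res)
--     return result
-- ===== SOURCE B (Python) =====
-- def _find_occurences(line, pattern):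
--     # Bottom-up DP over suffixes of line: row[p] holds the (absolute) index
--     # lists of subsequence occurrences of pattern[p:] in the current suffix;
--     # skipped-position tails are shared, masks are materialized once at the end.
--     if not pattern:
--         return []
--     row = [[] for _ in pattern] + [[[]]]
--     for j in range(len(line) - 1, -1, -1):
--         c = line[j]
--         row = [
--             ([[j] + t for t in nxt] if c == pc else []) + cur
--             for pc, cur, nxt in zip(pattern, row, row[1:])
--         ] + [row[-1]]
--     n = len(line)
--     result = []
--     for occ in row[0]:
--         mask = [0] * n
--         for i in occ:
--             mask[i] = 1
--         result.append(mask)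
--     return result
-- ===== Notes on version B (the rewrite author's own statement) =====
-- stated objective: alternative
-- what changed: Replaces A's top-down recursion on string slices (which re-slices the line and re-solves the same suffix subproblem once per earlier match) by a single bottom-up DP pass over line suffixes whose rows store shared occurrence index lists, with the 0/1 masks materialized once at the end.
import Mathlib
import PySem

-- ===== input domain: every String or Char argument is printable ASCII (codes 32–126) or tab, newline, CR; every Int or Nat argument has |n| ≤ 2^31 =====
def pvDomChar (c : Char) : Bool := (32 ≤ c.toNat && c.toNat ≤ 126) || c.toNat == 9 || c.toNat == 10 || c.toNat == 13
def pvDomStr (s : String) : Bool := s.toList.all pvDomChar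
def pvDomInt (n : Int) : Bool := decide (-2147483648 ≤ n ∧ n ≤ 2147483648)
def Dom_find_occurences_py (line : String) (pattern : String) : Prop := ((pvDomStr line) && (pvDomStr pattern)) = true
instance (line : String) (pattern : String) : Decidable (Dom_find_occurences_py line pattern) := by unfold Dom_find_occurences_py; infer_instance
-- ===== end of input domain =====

-- B replaces A's top-down recursion on string slices by a bottom-up DP pass over line
-- suffixes that shares skipped-position tails and materializes the masks once at the end (objective: alternative).
-- ===== PORT A =====
-- A's recursion: aRecA line pattern; the enumerate-loop is aLoopA (n = len(line), i = current index;
-- the line is iterated structurally, so line[(i+1):] is the tail at hand).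
mutual
def aRecA : List Char → List Char → List (List Int)
  | _, [] => []
  | line, ch :: rest => aLoopA line.length ch rest 0 line
termination_by line p => (p.length, line.length + 1)

def aLoopA (n : Nat) (ch : Char) (rest : List Char) : Nat → List Char → List (List Int)
  | _, [] => []
  | i, c :: tl =>
    (if c == ch then
       if rest = [] then
         [List.replicate i (0 : Int) ++ [1] ++ List.replicate (n - i - 1) (0 : Int)]
       else
         let rr := aRecA tl rest
         if rr = [] then []
         else rr.map (fun r => (List.replicate i (0 : Int) ++ [1]) ++ r)
     else []) ++ aLoopA n ch rest (i + 1) tl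
termination_by i tl => (rest.length + 1, tl.length)
end

def find_occurences_py (line : String) (pattern : String) : List (List Int) :=
  aRecA line.toList pattern.toList

-- ===== PORT B =====
-- one DP step: from the row for line[j+1:] to the row for line[j:] (c = line[j]); mirrors the zip comprehension
def bStep (c : Char) (j : Nat) : List Char → List (List (List Nat)) → List (List (List Nat))
  | pc :: ps', cur :: nxt :: row'' =>
      ((if c == pc then nxt.map (fun t => j :: t) else []) ++ cur) :: bStep c j ps' (nxt :: row'')
  | _, row => [row.headD []]

-- the reversed range loop: the row for line[j:], computed from the row for line[j+1:]
def bBuild (ps : List Char) : Nat → List Char → List (List (List Nat))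
  | _, [] => List.replicate ps.length [] ++ [[[]]]
  | j, c :: tl => bStep c j ps (bBuild ps (j + 1) tl)

-- mask materialization: mask = [0]*n; mask[i] = 1 for i in occ
def bMask (n : Nat) (occ : List Nat) : List Int :=
  occ.foldl (fun m i => m.set i 1) (List.replicate n (0 : Int))

def find_occurences_py_alt (line : String) (pattern : String) : List (List Int) :=
  let cs := line.toList
  let ps := pattern.toList
  if ps = [] then []
  else ((bBuild ps 0 cs).headD []).map (fun occ => bMask cs.length occ)

-- ===== PRECONDITION & SPEC =====
def Spec_find_occurences_py (line : String) (pattern : String) (out : List (List Int)) : Prop := out = find_occurences_py_alt line pattern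
instance (line : String) (pattern : String) (out : List (List Int)) : Decidable (Spec_find_occurences_py line pattern out) := by unfold Spec_find_occurences_py; infer_instance

-- ===== CLAIM (what is proved, stated in full; the proofs are below) =====
def Claim_equal_find_occurences_py : Prop := ∀ (line : String) (pattern : String), Dom_find_occurences_py line pattern → Spec_find_occurences_py line pattern (find_occurences_py line pattern)

-- ===== LEMMAS AND PROOFS =====

-- occurrence index lists (relative to the current suffix), in A's emission order
def occIdx : List Char → List Char → List (List Nat)
  | _, [] => [[]]
  | [], _ :: _ => []
  | c :: tl, ch :: rest =>
      (if c == ch then (occIdx tl rest).map (fun t => 0 :: t.map (· + 1)) else [])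
      ++ (occIdx tl (ch :: rest)).map (fun t => t.map (· + 1))

theorem aRecA_nil (q : List Char) : aRecA [] q = [] := by
  cases q <;> simp [aRecA, aLoopA]

theorem aRecA_cons (line : List Char) (ch : Char) (rest : List Char) :
    aRecA line (ch :: rest) = aLoopA line.length ch rest 0 line := by
  rw [aRecA]

theorem bMask_nil (n : Nat) : bMask n [] = List.replicate n 0 := rfl

theorem foldl_set_shift (a : Int) (t : List Nat) :
    ∀ l : List Int, (t.map (· + 1)).foldl (fun m i => m.set i 1) (a :: l)
      = a :: t.foldl (fun m i => m.set i 1) l := by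
  induction t with
  | nil => intro l; rfl
  | cons x xs ih => intro l; simp [List.foldl_cons, List.set_cons_succ, ih]

theorem bMask_shift0 (n : Nat) (t : List Nat) :
    bMask (n + 1) (t.map (· + 1)) = 0 :: bMask n t := by
  simp [bMask, List.replicate_succ, foldl_set_shift]

theorem bMask_shift1 (n : Nat) (t : List Nat) :
    bMask (n + 1) (0 :: t.map (· + 1)) = 1 :: bMask n t := by
  simp [bMask, List.replicate_succ, List.foldl_cons, List.set_cons_zero, foldl_set_shift]

theorem aLoopA_shift (ch : Char) (rest : List Char) :
    ∀ (tl : List Char) (i n : Nat),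
      aLoopA (n + 1) ch rest (i + 1) tl = (aLoopA n ch rest i tl).map (fun r => 0 :: r) := by
  intro tl
  induction tl with
  | nil => intro i n; simp [aLoopA]
  | cons c tl ih =>
    intro i n
    rw [aLoopA, aLoopA, List.map_append, ih]
    congr 1
    by_cases hch : c == ch
    · simp only [hch, if_true]
      by_cases hr : rest = []
      · simp [hr, List.replicate_succ]
      · simp only [hr, if_false]
        cases h : aRecA tl rest with
        | nil => simp
        | cons x xs => simp [List.map_map, Function.comp_def, List.replicate_succ]
    · simp [hch]

theorem aRecA_unfold (c ch : Char) (tl rest : List Char) :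
    aRecA (c :: tl) (ch :: rest) =
      (if c == ch then
        ((if rest = [] then [List.replicate tl.length (0 : Int)] else aRecA tl rest).map
          (fun r => 1 :: r))
       else [])
      ++ (aRecA tl (ch :: rest)).map (fun r => 0 :: r) := by
  rw [aRecA_cons, List.length_cons, aLoopA, aLoopA_shift, ← aRecA_cons]
  congr 1
  by_cases hch : c == ch
  · simp only [hch, if_true]
    by_cases hr : rest = []
    · simp [hr]
    · simp only [hr, if_false]
      cases h : aRecA tl rest with
      | nil => simp
      | cons x xs => simp
  · simp [hch]

theorem aRecA_eq_occIdx : ∀ (tl q : List Char), q ≠ [] →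
    aRecA tl q = (occIdx tl q).map (bMask tl.length) := by
  intro tl
  induction tl with
  | nil =>
    intro q hq
    cases q with
    | nil => exact absurd rfl hq
    | cons ch rest => simp [aRecA_nil, occIdx]
  | cons c tl ih =>
    intro q hq
    cases q with
    | nil => exact absurd rfl hq
    | cons ch rest =>
      rw [aRecA_unfold]
      simp only [occIdx, List.map_append, List.map_map, List.length_cons]
      have hfun1 : (bMask (tl.length + 1)) ∘ (fun t : List Nat => 0 :: List.map (· + 1) t)
          = fun t => 1 :: bMask tl.length t := by
        funext t; simp [bMask_shift1]
      have hfun0 : (bMask (tl.length + 1)) ∘ (fun t : List Nat => List.map (· + 1) t)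
          = fun t => 0 :: bMask tl.length t := by
        funext t; simp [bMask_shift0]
      congr 1
      · by_cases hch : c == ch
        · simp only [hch, if_true]
          by_cases hr : rest = []
          · subst hr
            have hb : bMask (tl.length + 1) [0] = 1 :: List.replicate tl.length 0 := by
              simpa [bMask_nil] using bMask_shift1 tl.length []
            simp [occIdx, hb]
          · rw [ih rest hr]; simp [hr, List.map_map, hfun1]
        · simp [hch]
      · rw [ih (ch :: rest) (by simp)]; simp [List.map_map, hfun0]

-- the DP row for the suffix tl at absolute offset j, expressed through occIdx
def rowForm (q : List Char) (j : Nat) (tl : List Char) : List (List (List Nat)) :=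
  (List.range (q.length + 1)).map (fun p => (occIdx tl (q.drop p)).map (List.map (· + j)))

theorem rowForm_cons (ch : Char) (rest : List Char) (j : Nat) (tl : List Char) :
    rowForm (ch :: rest) j tl
      = (occIdx tl (ch :: rest)).map (List.map (· + j)) :: rowForm rest j tl := by
  simp [rowForm, List.range_succ_eq_map, List.map_map, Function.comp_def]

theorem rowForm_nil_pat (j : Nat) (tl : List Char) :
    rowForm [] j tl = [[[]]] := by
  simp [rowForm, occIdx, List.range_succ]

theorem rowForm_head (q : List Char) (j : Nat) (tl : List Char) :
    ∃ tail, rowForm q j tl = (occIdx tl q).map (List.map (· + j)) :: tail := by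
  cases q with
  | nil => exact ⟨[], by rw [rowForm_nil_pat]; simp [occIdx]⟩
  | cons ch rest => exact ⟨rowForm rest j tl, rowForm_cons ch rest j tl⟩

theorem bStep_rowForm (c : Char) (j : Nat) (tl : List Char) :
    ∀ q : List Char, bStep c j q (rowForm q (j + 1) tl) = rowForm q j (c :: tl) := by
  intro q
  induction q with
  | nil => rw [rowForm_nil_pat, rowForm_nil_pat]; rfl
  | cons ch rest ih =>
    rw [rowForm_cons, rowForm_cons ch rest j (c :: tl)]
    obtain ⟨tail, htail⟩ := rowForm_head rest (j + 1) tl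
    rw [htail, bStep]
    rw [htail] at ih
    rw [ih]
    congr 1
    simp only [occIdx, List.map_append, List.map_map]
    congr 1
    · by_cases hch : c == ch
      · simp only [hch, if_true, List.map_map]
        apply List.map_congr_left
        intro t _
        simp only [Function.comp_def, List.map_cons, List.map_map, Nat.zero_add]
        congr 1
        apply List.map_congr_left
        intro x _
        omega
      · simp [hch]
    · apply List.map_congr_left
      intro t _
      simp only [Function.comp_def, List.map_map]
      apply List.map_congr_left
      intro x _
      omega

theorem rowForm_nil_line (q : List Char) (j : Nat) :
    rowForm q j [] = List.replicate q.length [] ++ [[[]]] := by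
  induction q with
  | nil => rw [rowForm_nil_pat]; rfl
  | cons ch rest ih =>
    rw [rowForm_cons, ih]
    simp [occIdx, List.replicate_succ]

theorem bBuild_rowForm (ps : List Char) :
    ∀ (tl : List Char) (j : Nat), bBuild ps j tl = rowForm ps j tl := by
  intro tl
  induction tl with
  | nil => intro j; rw [bBuild, rowForm_nil_line]
  | cons c tl ih =>
    intro j
    rw [bBuild, ih (j + 1), bStep_rowForm]

-- ===== VERDICT (by name: the statement is the Claim_ definition above) =====
theorem find_occurences_py_spec : Claim_equal_find_occurences_py := by
  intro line pattern _
  unfold Spec_find_occurences_py find_occurences_py find_occurences_py_alt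
  cases hps : pattern.toList with
  | nil => simp [aRecA]
  | cons ch rest =>
    simp only [reduceCtorEq, if_false]
    rw [bBuild_rowForm, rowForm_cons]
    have hadd0 : List.map (fun x : Nat => x + 0) = fun t : List Nat => t := by
      funext t; simp
    simp only [List.headD_cons, hadd0, List.map_map]
    rw [aRecA_eq_occIdx line.toList (ch :: rest) (by simp)]
    rfl
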